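-- pv_equiv track=rewrite | github.com/jussiiih/Python-ohjelmointia-tehokkailla-tietorakenteilla-ja-algoritmeilla | forbidden.py | count
-- ===== SOURCE A (Python) =====
-- def count(s, c):
--     pituus = 0
--     laskuri = 0
--     for kirjain in s:
--         if kirjain != c:
--             pituus +=1
--             laskuri += pituus
--         else:
--             pituus = 0
--
--     return laskuri
-- ===== SOURCE B (Python) =====
-- def count(s, c):
--     # different algorithm: record the positions where the forbidden character
--     # occurs, then sum the triangular number of each gap between consecutive
--     # occurrences (with virtual sentinels at -1 and len(s)).
--     hits = [i for i, ch in enumerate(s) if ch == c]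
--     bounds = [-1] + hits + [len(s)]
--     total = 0
--     for a, b in zip(bounds, bounds[1:]):
--         total += (b - a - 1) * (b - a) // 2
--     return total
-- ===== Notes on version B (the rewrite author's own statement) =====
-- stated objective: alternative
-- what changed: B first collects the index positions of the forbidden character, then computes the answer arithmetically as the sum of triangular numbers of the gaps between consecutive occurrences (with sentinels -1 and len(s)), instead of A's per-character running accumulation of prefix lengths.
import Mathlib
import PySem

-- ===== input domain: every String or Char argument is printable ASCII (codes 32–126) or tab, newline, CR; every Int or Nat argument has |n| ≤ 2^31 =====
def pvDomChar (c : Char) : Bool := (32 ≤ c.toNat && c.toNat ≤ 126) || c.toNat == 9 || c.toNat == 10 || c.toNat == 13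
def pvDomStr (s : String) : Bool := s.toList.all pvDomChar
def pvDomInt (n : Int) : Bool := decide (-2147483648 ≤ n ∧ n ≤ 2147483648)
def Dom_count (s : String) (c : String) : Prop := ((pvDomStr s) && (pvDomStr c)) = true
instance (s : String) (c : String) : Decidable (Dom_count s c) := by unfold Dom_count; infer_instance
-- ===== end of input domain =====

-- B replaces A's per-character prefix-length accumulation by a two-stage computation:
-- collect the positions of the forbidden character, then sum triangular numbers of the gaps.

-- ===== PORT A =====
-- step of A's loop: state (pituus, laskuri)
def stepA (c : String) (st : Int × Int) (ch : Char) : Int × Int :=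
  if String.ofList [ch] ≠ c then (st.1 + 1, st.2 + (st.1 + 1)) else (0, st.2)

def count (s : String) (c : String) : Int :=
  (s.toList.foldl (stepA c) (0, 0)).2

-- ===== PORT B =====
-- step of B's loop over the zipped adjacent bound pairs
def stepB (tot : Int) (p : Int × Int) : Int :=
  tot + PySem.Int.floordiv ((p.2 - p.1 - 1) * (p.2 - p.1)) 2

def count_alt (s : String) (c : String) : Int :=
  let hits : List Int :=
    ((PySem.List.enumerate s.toList).filter (fun p => String.ofList [p.2] = c)).map (·.1)
  let bounds : List Int := -1 :: (hits ++ [(s.toList.length : Int)])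
  (bounds.zip bounds.tail).foldl stepB 0

-- ===== PRECONDITION & SPEC =====
def Spec_count (s : String) (c : String) (out : Int) : Prop := out = count_alt s c
instance (s : String) (c : String) (out : Int) : Decidable (Spec_count s c out) := by unfold Spec_count; infer_instance

-- ===== CLAIM =====
def Claim_equal_count : Prop := ∀ (s : String) (c : String), Dom_count s c → Spec_count s c (count s c)

-- ===== LEMMAS AND PROOFS =====

-- triangular number r*(r+1)//2 (floor division, matching both programs' arithmetic)
def tri (r : Int) : Int := PySem.Int.floordiv (r * (r + 1)) 2

lemma tri_succ (p : Int) : tri (p + 1) = tri p + (p + 1) := by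
  obtain ⟨k, hk⟩ : 2 ∣ p * (p + 1) := (Int.even_mul_succ_self p).two_dvd
  have h2 : (p + 1) * (p + 1 + 1) = 2 * (k + (p + 1)) := by nlinarith [hk]
  simp only [tri, hk, h2, PySem.Int.floordiv_eq_ediv_of_pos (by norm_num : (0:Int) < 2)]
  omega

lemma tri_zero : tri 0 = 0 := by decide

-- the extra amount A's loop adds to laskuri when started with run length p
def Srun (c : String) : Int → List Char → Int
  | _, [] => 0
  | p, ch :: l => if String.ofList [ch] = c then Srun c 0 l else (p + 1) + Srun c (p + 1) l

lemma foldA_eq (c : String) (l : List Char) : ∀ p acc : Int,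
    (l.foldl (stepA c) (p, acc)).2 = acc + Srun c p l := by
  induction l with
  | nil => intro p acc; simp [Srun]
  | cons ch l ih =>
    intro p acc
    by_cases hc : String.ofList [ch] = c
    · simp [stepA, Srun, hc, ih]
    · simp only [List.foldl_cons, stepA, hc, ite_not, if_false, Srun, ih]
      ring

-- the hit positions of B, expressed recursively with a starting index
def Hits (c : String) : Int → List Char → List Int
  | _, [] => []
  | k, ch :: l => if String.ofList [ch] = c then k :: Hits c (k + 1) l else Hits c (k + 1) l

lemma hits_eq (c : String) (l : List Char) : ∀ k : Int,
    ((PySem.List.enumerate l k).filter (fun p => String.ofList [p.2] = c)).map (·.1)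
      = Hits c k l := by
  induction l with
  | nil => intro k; simp [PySem.List.enumerate_nil, Hits]
  | cons ch l ih =>
    intro k
    by_cases hc : String.ofList [ch] = c <;>
      simp [PySem.List.enumerate_cons, hc, Hits, ih]

-- the gap-sum over bounds a :: Hits c k l ++ [k + |l|] equals tri of the current
-- run length (k - a - 1) plus what A's loop would still add
lemma gap_sum (c : String) (l : List Char) : ∀ a k t : Int,
    (let bounds := a :: (Hits c k l ++ [k + (l.length : Int)])
     (bounds.zip bounds.tail).foldl stepB t)
      = t + tri (k - a - 1) + Srun c (k - a - 1) l := by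
  induction l with
  | nil => intro a k t; simp [Hits, Srun, stepB, tri]
  | cons ch l ih =>
    intro a k t
    by_cases hc : String.ofList [ch] = c
    · simp only [Hits, if_pos hc, List.length_cons, Srun]
      have hlen : k + ((l.length + 1 : Nat) : Int) = (k + 1) + (l.length : Int) := by
        push_cast; ring
      simp only [hlen, List.cons_append, List.zip_cons_cons, List.tail_cons, List.foldl_cons]
      have := ih k (k + 1) (stepB t (a, k))
      simp only [List.tail_cons] at this ⊢
      rw [this]
      have : (k + 1) - k - 1 = 0 := by ring
      rw [this, tri_zero]
      simp only [stepB, tri]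
      have : (k - a - 1) + 1 = k - a := by ring
      rw [this]
      ring
    · simp only [Hits, List.length_cons, Srun, if_neg hc]
      have hlen : k + ((l.length + 1 : Nat) : Int) = (k + 1) + (l.length : Int) := by
        push_cast; ring
      simp only [hlen]
      have := ih a (k + 1) t
      simp only at this ⊢
      rw [this]
      have h1 : (k + 1) - a - 1 = (k - a - 1) + 1 := by ring
      rw [h1, tri_succ]
      ring

theorem count_eq_alt (s c : String) : count s c = count_alt s c := by
  unfold count count_alt
  rw [foldA_eq, hits_eq c s.toList 0]
  have := gap_sum c s.toList (-1) 0 0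
  simp only [zero_add] at this ⊢
  rw [this]
  norm_num [tri_zero]

-- ===== VERDICT =====
theorem count_spec : Claim_equal_count := by
  intro s c _
  unfold Spec_count
  exact count_eq_alt s c
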